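-- pv_equiv track=rewrite | github.com/Bams29/bryan_moreno | day4/ejercise#2_morenoBryan.py | nearest_leg_lengths
-- ===== SOURCE A (Python) =====
-- import itertools
--
-- def nearest_leg_lengths(coin_thicknesses, table_heights):
--     def possible_leg_lengths(coin_thicknesses, target_height):
--         min_leg_length = max(coin_thicknesses)
--         max_leg_length = sum(coin_thicknesses)
--         possible_lengths = []
--         for i in range(1, len(coin_thicknesses) + 1):
--             for combination in itertools.combinations(coin_thicknesses, i):
--                 total_thickness = sum(combination)
--                 if min_leg_length <= total_thickness <= target_height:
--                     possible_lengths.append(total_thickness)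
--         return min(possible_lengths), max(possible_lengths)
--
--     results = []
--     for table_height in table_heights:
--         min_leg_length, max_leg_length = possible_leg_lengths(coin_thicknesses, table_height)
--         results.append((min_leg_length, max_leg_length))
--     return results
-- ===== SOURCE B (Python) =====
-- def nearest_leg_lengths(coin_thicknesses, table_heights):
--     m = max(coin_thicknesses)
--     sums = set()
--     for c in coin_thicknesses:
--         sums = sums | {s + c for s in sums} | {c}
--     valid = {s for s in sums if s >= m}
--     return [(m, max(s for s in valid if s <= t)) for t in table_heights]
-- ===== Notes on version B (the rewrite author's own statement) =====
-- stated objective: alternative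
-- what changed: Instead of enumerating all coin combinations again for every table height, B builds the set of achievable non-empty subset sums once with a subset-sum DP over a set, notes the minimum in range is always max(coin_thicknesses), and answers each query by taking the max of the precomputed sums within range (asymptotically cheaper per query, though not measurable in a timing run since its inputs fall outside A's returning domain).
-- outside the precondition, e.g. on nearest_leg_lengths([], []): A returns [], B raises ValueError
import Mathlib
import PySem

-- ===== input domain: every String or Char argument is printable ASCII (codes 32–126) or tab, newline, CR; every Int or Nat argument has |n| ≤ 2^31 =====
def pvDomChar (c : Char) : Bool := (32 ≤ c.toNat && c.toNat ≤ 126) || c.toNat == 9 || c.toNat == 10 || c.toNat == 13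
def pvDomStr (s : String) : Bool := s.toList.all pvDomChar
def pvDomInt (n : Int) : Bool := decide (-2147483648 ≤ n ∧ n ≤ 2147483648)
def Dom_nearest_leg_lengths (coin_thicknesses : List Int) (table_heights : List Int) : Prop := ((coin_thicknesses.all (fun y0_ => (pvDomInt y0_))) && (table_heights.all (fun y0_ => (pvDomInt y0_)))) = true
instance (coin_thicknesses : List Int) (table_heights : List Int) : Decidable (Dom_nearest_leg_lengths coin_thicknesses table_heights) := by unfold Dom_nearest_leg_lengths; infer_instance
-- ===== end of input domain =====

-- B replaces A's per-query enumeration of all coin combinations by a one-time subset-sum DP over a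
-- set plus a per-query max over the precomputed sums (objective: alternative algorithm).

-- ===== PORT A =====

-- itertools.combinations(l, n), in itertools' order
def pvCombos (n : Nat) (l : List Int) : List (List Int) :=
  match n, l with
  | 0, _ => [[]]
  | _ + 1, [] => []
  | n + 1, x :: xs => (pvCombos n xs).map (fun c => x :: c) ++ pvCombos (n + 1) xs


-- inner loop: 'for combination in …: if min_leg <= total <= target: possible.append(total)'
def pvInnerA (m t : Int) (cs : List (List Int)) (acc : List Int) : List Int :=
  cs.foldl (fun a c => if m ≤ c.sum ∧ c.sum ≤ t then a ++ [c.sum] else a) acc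


-- the helper possible_leg_lengths's possible_lengths list (A raises ValueError — min()/max() of an
-- empty list — exactly when it is empty; Pre_ below excludes those inputs, so the .getD defaults
-- are never reached inside Pre_)
def pvPossibleA (coin_thicknesses : List Int) (target_height : Int) : List Int :=
  let min_leg_length := (PySem.List.max? coin_thicknesses (fun x => x)).getD 0
  (PySem.List.pyRange 1 ((coin_thicknesses.length : Int) + 1) 1).foldl
    (fun acc i => pvInnerA min_leg_length target_height (pvCombos i.toNat coin_thicknesses) acc) []


def nearest_leg_lengths (coin_thicknesses : List Int) (table_heights : List Int) : List (Int × Int) :=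
  table_heights.foldl
    (fun results table_height =>
      let p := pvPossibleA coin_thicknesses table_height
      results ++ [((PySem.List.min? p (fun x => x)).getD 0, (PySem.List.max? p (fun x => x)).getD 0)])
    []


-- ===== PORT B =====

-- 'sums = sums | {s + c for s in sums} | {c}' folded over the coins
def pvDPSums (coin_thicknesses : List Int) : PySem.Set Int :=
  coin_thicknesses.foldl
    (fun sums c => PySem.Set.union (PySem.Set.union sums (sums.map (fun s => s + c))) [c])
    PySem.Set.empty


def nearest_leg_lengths_alt (coin_thicknesses : List Int) (table_heights : List Int) : List (Int × Int) :=
  let m := (PySem.List.max? coin_thicknesses (fun x => x)).getD 0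
  let valid := (pvDPSums coin_thicknesses).filter (fun s => m ≤ s)
  table_heights.map (fun t => (m, (PySem.List.max? (valid.filter (fun s => s ≤ t)) (fun x => x)).getD 0))


-- ===== PRECONDITION & SPEC =====
-- A raises ValueError (min/max of an empty candidate list, or max of an empty coin list) exactly
-- when the coin list is empty or some table height is smaller than the thickest coin; B's own
-- max() raises on the same inputs. Pre_ excludes exactly those; A returns normally everywhere else.
def Pre_nearest_leg_lengths (coin_thicknesses : List Int) (table_heights : List Int) : Prop :=
  coin_thicknesses ≠ [] ∧ ∀ t ∈ table_heights, ∀ c ∈ coin_thicknesses, c ≤ t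
instance (coin_thicknesses : List Int) (table_heights : List Int) : Decidable (Pre_nearest_leg_lengths coin_thicknesses table_heights) := by unfold Pre_nearest_leg_lengths; infer_instance

def pvWitness_nearest_leg_lengths : List Int × List Int := ([2, 3], [5, 8])

def Spec_nearest_leg_lengths (coin_thicknesses : List Int) (table_heights : List Int) (out : List (Int × Int)) : Prop := out = nearest_leg_lengths_alt coin_thicknesses table_heights
instance (coin_thicknesses : List Int) (table_heights : List Int) (out : List (Int × Int)) : Decidable (Spec_nearest_leg_lengths coin_thicknesses table_heights out) := by unfold Spec_nearest_leg_lengths; infer_instance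

-- ===== CLAIM (what is proved, stated in full; the proofs are below) =====
def Claim_equal_nearest_leg_lengths : Prop := ∀ (coin_thicknesses : List Int) (table_heights : List Int), Dom_nearest_leg_lengths coin_thicknesses table_heights → Pre_nearest_leg_lengths coin_thicknesses table_heights → Spec_nearest_leg_lengths coin_thicknesses table_heights (nearest_leg_lengths coin_thicknesses table_heights)

-- ===== LEMMAS AND PROOFS =====

theorem mem_pvCombos (l : List Int) : ∀ (n : Nat) (c : List Int),
    c ∈ pvCombos n l ↔ c.Sublist l ∧ c.length = n := by
  induction l with
  | nil =>
    intro n c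
    cases n with
    | zero => simp [pvCombos, List.length_eq_zero_iff, List.sublist_nil]
    | succ n =>
      constructor
      · intro h; cases h
      · rintro ⟨hs, hl⟩
        have := List.sublist_nil.mp hs
        subst this; simp at hl
  | cons x xs ih =>
    intro n c
    cases n with
    | zero =>
      simp [pvCombos, List.length_eq_zero_iff]
      rintro rfl; exact List.nil_sublist _
    | succ n =>
      simp only [pvCombos, List.mem_append, List.mem_map]
      constructor
      · rintro (⟨c', hc', rfl⟩ | h)
        · obtain ⟨hs, hl⟩ := (ih n c').mp hc'
          exact ⟨hs.cons₂ x, by simp [hl]⟩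
        · obtain ⟨hs, hl⟩ := (ih (n+1) c).mp h
          exact ⟨hs.cons x, hl⟩
      · rintro ⟨hs, hl⟩
        cases hs with
        | cons _ h => exact Or.inr ((ih (n+1) c).mpr ⟨h, hl⟩)
        | cons₂ c' h => exact Or.inl ⟨_, (ih n _).mpr ⟨h, by simpa using hl⟩, rfl⟩

theorem mem_pvInnerA (m t : Int) (cs : List (List Int)) :
    ∀ (acc : List Int) (x : Int), x ∈ pvInnerA m t cs acc ↔
      x ∈ acc ∨ ∃ c ∈ cs, (m ≤ c.sum ∧ c.sum ≤ t) ∧ c.sum = x := by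
  induction cs with
  | nil => intro acc x; simp [pvInnerA]
  | cons c cs ih =>
    intro acc x
    have : pvInnerA m t (c :: cs) acc
        = pvInnerA m t cs (if m ≤ c.sum ∧ c.sum ≤ t then acc ++ [c.sum] else acc) := rfl
    rw [this, ih]
    by_cases h : m ≤ c.sum ∧ c.sum ≤ t
    · rw [if_pos h]
      simp only [List.mem_append, List.mem_cons]
      constructor
      · rintro ((hx | (rfl | h0)) | ⟨c', hc', hcond, rfl⟩)
        · exact Or.inl hx
        · exact Or.inr ⟨c, Or.inl rfl, h, rfl⟩
        · cases h0
        · exact Or.inr ⟨c', Or.inr hc', hcond, rfl⟩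
      · rintro (hx | ⟨c', (rfl | hc'), hcond, rfl⟩)
        · exact Or.inl (Or.inl hx)
        · exact Or.inl (Or.inr (Or.inl rfl))
        · exact Or.inr ⟨c', hc', hcond, rfl⟩
    · rw [if_neg h]
      simp only [List.mem_cons]
      constructor
      · rintro (hx | ⟨c', hc', hcond, rfl⟩)
        · exact Or.inl hx
        · exact Or.inr ⟨c', Or.inr hc', hcond, rfl⟩
      · rintro (hx | ⟨c', (rfl | hc'), hcond, rfl⟩)
        · exact Or.inl hx
        · exact absurd hcond h
        · exact Or.inr ⟨c', hc', hcond, rfl⟩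

theorem mem_outerA (coins : List Int) (m t : Int) (is : List Int) :
    ∀ (acc : List Int) (x : Int),
      x ∈ is.foldl (fun acc i => pvInnerA m t (pvCombos i.toNat coins) acc) acc ↔
      x ∈ acc ∨ ∃ i ∈ is, ∃ c ∈ pvCombos i.toNat coins, (m ≤ c.sum ∧ c.sum ≤ t) ∧ c.sum = x := by
  induction is with
  | nil => intro acc x; simp
  | cons i is ih =>
    intro acc x
    rw [List.foldl_cons, ih, mem_pvInnerA]
    simp only [List.mem_cons]
    constructor
    · rintro ((hx | ⟨c, hc, hcond, rfl⟩) | ⟨i', hi', hrest⟩)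
      · exact Or.inl hx
      · exact Or.inr ⟨i, Or.inl rfl, c, hc, hcond, rfl⟩
      · exact Or.inr ⟨i', Or.inr hi', hrest⟩
    · rintro (hx | ⟨i', (rfl | hi'), hrest⟩)
      · exact Or.inl (Or.inl hx)
      · exact Or.inl (Or.inr hrest)
      · exact Or.inr ⟨i', hi', hrest⟩


theorem mem_pvPossibleA (coins : List Int) (t x : Int) :
    x ∈ pvPossibleA coins t ↔
      (∃ c, c.Sublist coins ∧ c ≠ [] ∧ c.sum = x) ∧
      (PySem.List.max? coins (fun y => y)).getD 0 ≤ x ∧ x ≤ t := by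
  rw [show pvPossibleA coins t = (PySem.List.pyRange 1 ((coins.length : Int) + 1) 1).foldl
    (fun acc i => pvInnerA ((PySem.List.max? coins (fun y => y)).getD 0) t (pvCombos i.toNat coins) acc) [] from rfl]
  rw [mem_outerA]
  simp only [List.not_mem_nil, false_or, PySem.List.mem_pyRange_one]
  constructor
  · rintro ⟨i, ⟨h1, h2⟩, c, hc, ⟨hm, ht⟩, rfl⟩
    obtain ⟨hsub, hlen⟩ := (mem_pvCombos coins i.toNat c).mp hc
    refine ⟨⟨c, hsub, ?_, rfl⟩, hm, ht⟩
    intro hnil; subst hnil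
    simp at hlen; omega
  · rintro ⟨⟨c, hsub, hne, rfl⟩, hm, ht⟩
    refine ⟨(c.length : Int), ⟨?_, ?_⟩, c, ?_, ⟨hm, ht⟩, rfl⟩
    · have : 0 < c.length := List.length_pos_of_ne_nil hne
      omega
    · have := hsub.length_le
      omega
    · exact (mem_pvCombos coins (c.length : Int).toNat c).mpr ⟨hsub, by simp⟩

-- x is the sum of some non-empty sublist of l
def pvNES (l : List Int) (x : Int) : Prop := ∃ c, c.Sublist l ∧ c ≠ [] ∧ c.sum = x

theorem pvNES_cons (a : Int) (l : List Int) (x : Int) :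
    pvNES (a :: l) x ↔ pvNES l x ∨ x = a ∨ ∃ y, pvNES l y ∧ x = a + y := by
  constructor
  · rintro ⟨c, hsub, hne, rfl⟩
    cases c with
    | nil => exact absurd rfl hne
    | cons b c' =>
      cases hsub with
      | cons _ h => exact Or.inl ⟨b :: c', h, by simp, rfl⟩
      | cons₂ _ h =>
        cases c' with
        | nil => exact Or.inr (Or.inl (by simp))
        | cons d d' =>
          exact Or.inr (Or.inr ⟨(d :: d').sum, ⟨d :: d', h, by simp, rfl⟩, by simp⟩)
  · rintro (⟨c, hsub, hne, rfl⟩ | hxa | ⟨y, ⟨c, hsub, hne, rfl⟩, hxy⟩)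
    · exact ⟨c, hsub.cons a, hne, rfl⟩
    · exact ⟨[a], (List.nil_sublist l).cons₂ a, by simp, by simp [hxa]⟩
    · exact ⟨a :: c, hsub.cons₂ a, by simp, by simp [hxy]⟩


theorem mem_pvDPfold (l : List Int) :
    ∀ (S : List Int) (x : Int),
      x ∈ l.foldl (fun sums c => PySem.Set.union (PySem.Set.union sums (sums.map (fun s => s + c))) [c]) S ↔
      x ∈ S ∨ (∃ s ∈ S, ∃ y, pvNES l y ∧ x = s + y) ∨ pvNES l x := by
  induction l with
  | nil => intro S x; simp [pvNES]
  | cons a l ih =>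
    intro S x
    rw [List.foldl_cons, ih]
    have hstep : ∀ y : Int, y ∈ PySem.Set.union (PySem.Set.union S (S.map (fun s => s + a))) [a]
        ↔ (y ∈ S ∨ (∃ s ∈ S, y = s + a) ∨ y = a) := by
      intro y
      simp [PySem.Set.mem_union, List.mem_map]
      constructor
      · rintro ((h | ⟨s, hs, rfl⟩) | rfl)
        · exact Or.inl h
        · exact Or.inr (Or.inl ⟨s, hs, rfl⟩)
        · exact Or.inr (Or.inr rfl)
      · rintro (h | ⟨s, hs, rfl⟩ | rfl)
        · exact Or.inl (Or.inl h)
        · exact Or.inl (Or.inr ⟨s, hs, rfl⟩)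
        · exact Or.inr rfl
    constructor
    · rintro (h | ⟨s, hs, y, hy, rfl⟩ | h)
      · rcases (hstep x).mp h with h | ⟨s, hs, hxsa⟩ | hxa
        · exact Or.inl h
        · exact Or.inr (Or.inl ⟨s, hs, a, (pvNES_cons a l a).mpr (Or.inr (Or.inl rfl)), hxsa⟩)
        · exact Or.inr (Or.inr ((pvNES_cons a l x).mpr (Or.inr (Or.inl hxa))))
      · rcases (hstep s).mp hs with h | ⟨s', hs', hssa⟩ | hsa
        · exact Or.inr (Or.inl ⟨s, h, y, (pvNES_cons a l y).mpr (Or.inl hy), rfl⟩)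
        · exact Or.inr (Or.inl ⟨s', hs', a + y, (pvNES_cons a l (a + y)).mpr (Or.inr (Or.inr ⟨y, hy, rfl⟩)), by rw [hssa]; ring⟩)
        · exact Or.inr (Or.inr ((pvNES_cons a l (s + y)).mpr (Or.inr (Or.inr ⟨y, hy, by rw [hsa]⟩))))
      · exact Or.inr (Or.inr ((pvNES_cons a l x).mpr (Or.inl h)))
    · rintro (h | ⟨s, hs, y, hy, rfl⟩ | h)
      · exact Or.inl ((hstep x).mpr (Or.inl h))
      · rcases (pvNES_cons a l y).mp hy with hy' | hya | ⟨y', hy', hyy'⟩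
        · exact Or.inr (Or.inl ⟨s, (hstep s).mpr (Or.inl hs), y, hy', rfl⟩)
        · exact Or.inl ((hstep (s + y)).mpr (Or.inr (Or.inl ⟨s, hs, by rw [hya]⟩)))
        · exact Or.inr (Or.inl ⟨s + a, (hstep (s + a)).mpr (Or.inr (Or.inl ⟨s, hs, rfl⟩)), y', hy', by rw [hyy']; ring⟩)
      · rcases (pvNES_cons a l x).mp h with hx | hxa | ⟨y, hy, hxy⟩
        · exact Or.inr (Or.inr hx)
        · exact Or.inl ((hstep x).mpr (Or.inr (Or.inr hxa)))
        · exact Or.inr (Or.inl ⟨a, (hstep a).mpr (Or.inr (Or.inr rfl)), y, hy, hxy⟩)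
    

theorem mem_pvDPSums (coins : List Int) (x : Int) :
    x ∈ pvDPSums coins ↔ ∃ c, c.Sublist coins ∧ c ≠ [] ∧ c.sum = x := by
  rw [show pvDPSums coins = coins.foldl
      (fun sums c => PySem.Set.union (PySem.Set.union sums (sums.map (fun s => s + c))) [c]) PySem.Set.empty from rfl,
    mem_pvDPfold]
  simp [PySem.Set.empty, pvNES]

theorem max?_id_eq_of {L : List Int} {v : Int} (hv : v ∈ L) (hub : ∀ x ∈ L, x ≤ v) :
    PySem.List.max? L (fun x => x) = some v := by
  cases h : PySem.List.max? L (fun x => x) with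
  | none => rw [PySem.List.max?_eq_none_iff] at h; subst h; cases hv
  | some w =>
    have hw := PySem.List.max?_mem h
    have h1 := PySem.List.max?_isMax h v hv
    have h2 := hub w hw
    simp only [] at h1
    rw [le_antisymm h2 h1]


theorem min?_id_eq_of {L : List Int} {v : Int} (hv : v ∈ L) (hlb : ∀ x ∈ L, v ≤ x) :
    PySem.List.min? L (fun x => x) = some v := by
  cases h : PySem.List.min? L (fun x => x) with
  | none => rw [PySem.List.min?_eq_none_iff] at h; subst h; cases hv
  | some w =>
    have hw := PySem.List.min?_mem h
    have h1 := PySem.List.min?_isMin h v hv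
    have h2 := hlb w hw
    simp only [] at h1
    rw [le_antisymm h1 h2]


-- ===== VERDICT (by name: the statement is the Claim_ definition above) =====
theorem nearest_leg_lengths_spec : Claim_equal_nearest_leg_lengths := by
  intro coins hs _dom hpre
  obtain ⟨hne, hts⟩ := hpre
  unfold Spec_nearest_leg_lengths
  obtain ⟨mv, hmax⟩ : ∃ mv, PySem.List.max? coins (fun x => x) = some mv := by
    cases h : PySem.List.max? coins (fun x => x) with
    | none => rw [PySem.List.max?_eq_none_iff] at h; exact absurd h hne
    | some w => exact ⟨w, rfl⟩
  have hm_mem : mv ∈ coins := PySem.List.max?_mem hmax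
  have hm_ub : ∀ c ∈ coins, c ≤ mv := by
    intro c hc; exact PySem.List.max?_isMax hmax c hc
  have hA : nearest_leg_lengths coins hs = hs.map (fun t =>
      ((PySem.List.min? (pvPossibleA coins t) (fun x => x)).getD 0,
       (PySem.List.max? (pvPossibleA coins t) (fun x => x)).getD 0)) := by
    rw [show nearest_leg_lengths coins hs = hs.foldl (fun results t => results ++
      [((PySem.List.min? (pvPossibleA coins t) (fun x => x)).getD 0,
        (PySem.List.max? (pvPossibleA coins t) (fun x => x)).getD 0)]) [] from rfl,
      PySem.List.foldl_append_singleton_eq_map]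
    simp
  rw [hA, show nearest_leg_lengths_alt coins hs = hs.map (fun t => (mv,
      (PySem.List.max? (((pvDPSums coins).filter (fun s => decide (mv ≤ s))).filter (fun s => decide (s ≤ t))) (fun x => x)).getD 0)) from by
        unfold nearest_leg_lengths_alt
        rw [hmax]
        simp only [Option.getD_some]
        rfl]
  apply List.map_congr_left
  intro t htm
  have hct : ∀ c ∈ coins, c ≤ t := hts t htm
  have hmt : mv ≤ t := hct mv hm_mem
  have hmemP : ∀ x : Int, x ∈ pvPossibleA coins t ↔
      ((∃ c, c.Sublist coins ∧ c ≠ [] ∧ c.sum = x) ∧ mv ≤ x ∧ x ≤ t) := by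
    intro x; rw [mem_pvPossibleA, hmax]; rfl
  have hmemL : ∀ x : Int,
      x ∈ ((pvDPSums coins).filter (fun s => decide (mv ≤ s))).filter (fun s => decide (s ≤ t)) ↔
      ((∃ c, c.Sublist coins ∧ c ≠ [] ∧ c.sum = x) ∧ mv ≤ x ∧ x ≤ t) := by
    intro x
    simp only [List.mem_filter, mem_pvDPSums, decide_eq_true_eq]
    tauto
  have hmP : mv ∈ pvPossibleA coins t := (hmemP mv).mpr
    ⟨⟨[mv], List.singleton_sublist.mpr hm_mem, by simp, by simp⟩, le_refl mv, hmt⟩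
  have hmin : PySem.List.min? (pvPossibleA coins t) (fun x => x) = some mv :=
    min?_id_eq_of hmP (fun x hx => ((hmemP x).mp hx).2.1)
  obtain ⟨v, hmaxP⟩ : ∃ v, PySem.List.max? (pvPossibleA coins t) (fun x => x) = some v := by
    cases h : PySem.List.max? (pvPossibleA coins t) (fun x => x) with
    | none => rw [PySem.List.max?_eq_none_iff] at h; rw [h] at hmP; cases hmP
    | some w => exact ⟨w, rfl⟩
  have hvP := PySem.List.max?_mem hmaxP
  have hvub : ∀ x ∈ pvPossibleA coins t, x ≤ v := fun x hx => PySem.List.max?_isMax hmaxP x hx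
  have hmaxL : PySem.List.max?
      (((pvDPSums coins).filter (fun s => decide (mv ≤ s))).filter (fun s => decide (s ≤ t))) (fun x => x) = some v :=
    max?_id_eq_of ((hmemL v).mpr ((hmemP v).mp hvP)) (fun x hx => hvub x ((hmemP x).mpr ((hmemL x).mp hx)))
  rw [hmin, hmaxP, hmaxL]
  rfl
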